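-- pv_equiv track=rewrite | github.com/maathmaath/repos | daily_coding/v6.py | check
-- ===== SOURCE A (Python) =====
-- def check(arr, N):
--     count_arr = [j for i in arr for j in i]
--     B = count_arr.count('B')
--     R = count_arr.count('R')
--     if not (B+1 == R or B-1 == R or B == R):
--         return 'Impossible'
--     blue_win = False
--     red_win = False
--     for i in arr:
--         if not blue_win:
--             if all(j == 'B' for j in i):
--                 blue_win = True
--         else:
--             break
--     for i in range(1, N-1):
--         col = [arr[j][i] for j in range(N)]
--         if not red_win:
--             if all(j == 'R' for j in col):
--                 red_win = True
--         else:
--             break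
--     if blue_win and red_win:
--         return 'Impossible'
--     elif blue_win:
--         return 'Blue'
--     elif red_win:
--         return 'Red'
--     else:
--         return 'Nobody'
-- ===== SOURCE B (Python) =====
-- def check(arr, N):
--     # One pass over all cells: total B/R counts and the all-'B'-row flag together;
--     # red columns found by pruning candidate column indices row by row.
--     B = 0
--     R = 0
--     blue_win = False
--     for row in arr:
--         rb = 0
--         for x in row:
--             if x == 'B':
--                 B += 1
--                 rb += 1
--             elif x == 'R':
--                 R += 1
--         if rb == len(row):
--             blue_win = True
--     if abs(B - R) > 1:
--         return 'Impossible'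
--     cand = list(range(1, N - 1))
--     for j in range(N):
--         cand = [i for i in cand if arr[j][i] == 'R']
--     red_win = bool(cand)
--     if blue_win and red_win:
--         return 'Impossible'
--     if blue_win:
--         return 'Blue'
--     if red_win:
--         return 'Red'
--     return 'Nobody'
-- ===== Notes on version B (the rewrite author's own statement) =====
-- stated objective: alternative
-- what changed: Replaces the flatten-then-count pass, the all() row scan and the per-column list construction by a single row-major pass accumulating B/R totals and the all-B-row flag, plus a candidate-column pruning loop (filter surviving column indices row by row) for the red check.
import Mathlib
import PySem

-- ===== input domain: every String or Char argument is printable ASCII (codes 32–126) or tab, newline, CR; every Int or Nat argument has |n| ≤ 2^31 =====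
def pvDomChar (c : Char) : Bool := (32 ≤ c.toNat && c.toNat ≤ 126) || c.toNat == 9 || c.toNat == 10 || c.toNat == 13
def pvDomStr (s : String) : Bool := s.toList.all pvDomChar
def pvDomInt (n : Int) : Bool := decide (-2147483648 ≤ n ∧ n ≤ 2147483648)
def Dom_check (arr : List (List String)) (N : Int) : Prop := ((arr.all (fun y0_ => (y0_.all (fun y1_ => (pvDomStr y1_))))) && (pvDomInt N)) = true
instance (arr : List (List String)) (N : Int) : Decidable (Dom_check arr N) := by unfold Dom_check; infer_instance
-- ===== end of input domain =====

-- B replaces A's three separate scans (flatten+count, all() per row, per-column list build)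
-- by one row-major counting pass plus a candidate-column pruning loop; return values only.

-- ===== PORT A =====
-- for i in arr: if not blue_win: if all(j=='B' for j in i): blue_win=True; else: break
def checkBlueLoop : List (List String) → Bool → Bool
  | [], bw => bw
  | r :: rs, bw =>
      if !bw then checkBlueLoop rs (if r.all (fun j => j == "B") then true else bw)
      else bw

-- col = [arr[j][i] for j in range(N)]; the getD defaults are never reached inside Pre_check
def checkCol (arr : List (List String)) (N i : Int) : List String :=
  (PySem.List.pyRange 0 N 1).map
    (fun j => (PySem.List.pyGet? ((PySem.List.pyGet? arr j).getD []) i).getD "")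

-- for i in range(1, N-1): col = …; if not red_win: if all(j=='R' for j in col): red_win=True; else: break
def checkRedLoop (arr : List (List String)) (N : Int) : List Int → Bool → Bool
  | [], rw => rw
  | i :: rest, rw =>
      let col := checkCol arr N i
      if !rw then checkRedLoop arr N rest (if col.all (fun j => j == "R") then true else rw)
      else rw

def check (arr : List (List String)) (N : Int) : String :=
  let count_arr := arr.flatMap (fun i => i)
  let B : Int := (PySem.List.count count_arr "B" : Int)
  let R : Int := (PySem.List.count count_arr "R" : Int)
  if !(B + 1 == R || B - 1 == R || B == R) then "Impossible"
  else
    let blue_win := checkBlueLoop arr false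
    let red_win := checkRedLoop arr N (PySem.List.pyRange 1 (N - 1) 1) false
    if blue_win && red_win then "Impossible"
    else if blue_win then "Blue"
    else if red_win then "Red"
    else "Nobody"

-- ===== PORT B =====
-- per-row: add this row's B/R to the totals (rb counts the row's 'B's) and update blue_win
def altCell (q : Int × Int × Int) (x : String) : Int × Int × Int :=
  if x == "B" then (q.1 + 1, q.2.1, q.2.2 + 1)
  else if x == "R" then (q.1, q.2.1 + 1, q.2.2)
  else q

def altScanRow (s : Int × Int × Bool) (row : List String) : Int × Int × Bool :=
  let t := row.foldl altCell (s.1, s.2.1, 0)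
  (t.1, t.2.1, s.2.2 || (t.2.2 == (row.length : Int)))

def check_alt (arr : List (List String)) (N : Int) : String :=
  let s := arr.foldl altScanRow (0, 0, false)
  let B := s.1
  let R := s.2.1
  let blue_win := s.2.2
  if 1 < |B - R| then "Impossible"
  else
    -- cand = list(range(1, N-1)); for j in range(N): cand = [i for i in cand if arr[j][i] == 'R']
    let cand := (PySem.List.pyRange 0 N 1).foldl
      (fun c j => c.filter
        (fun i => (PySem.List.pyGet? ((PySem.List.pyGet? arr j).getD []) i).getD "" == "R"))
      (PySem.List.pyRange 1 (N - 1) 1)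
    let red_win := !cand.isEmpty
    if blue_win && red_win then "Impossible"
    else if blue_win then "Blue"
    else if red_win then "Red"
    else "Nobody"

-- ===== PRECONDITION & SPEC =====
-- Pre_check excludes the inputs on which A's column construction arr[j][i] (j<N, i<N-1) raises
-- IndexError; the grid-shape disjunct is a sufficient bound (first N rows of length ≥ N-1), so it
-- also excludes a few ragged grids on which A still returns only because its red loop broke early
-- after the first all-'R' column (see cites).
def Pre_check (arr : List (List String)) (N : Int) : Prop :=
  ¬((PySem.List.count (arr.flatMap (fun i => i)) "B" : Int) + 1 = (PySem.List.count (arr.flatMap (fun i => i)) "R" : Int)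
      ∨ (PySem.List.count (arr.flatMap (fun i => i)) "B" : Int) - 1 = (PySem.List.count (arr.flatMap (fun i => i)) "R" : Int)
      ∨ (PySem.List.count (arr.flatMap (fun i => i)) "B" : Int) = (PySem.List.count (arr.flatMap (fun i => i)) "R" : Int))
  ∨ N ≤ 2
  ∨ (N ≤ (arr.length : Int) ∧ ∀ row ∈ arr.take N.toNat, N - 1 ≤ (row.length : Int))
instance (arr : List (List String)) (N : Int) : Decidable (Pre_check arr N) := by
  unfold Pre_check; infer_instance

def pvWitness_check : List (List String) × Int := ([["B", "R"], ["R", "x"]], 2)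

def Spec_check (arr : List (List String)) (N : Int) (out : String) : Prop := out = check_alt arr N
instance (arr : List (List String)) (N : Int) (out : String) : Decidable (Spec_check arr N out) := by
  unfold Spec_check; infer_instance

-- ===== CLAIM (what is proved, stated in full; the proofs are below) =====
def Claim_equal_check : Prop := ∀ (arr : List (List String)) (N : Int), Dom_check arr N → Pre_check arr N → Spec_check arr N (check arr N)

-- ===== LEMMAS AND PROOFS =====

-- the row fold of altScanRow adds the row's counts to any starting state
theorem altRowFold (row : List String) (b r k : Int) :
    row.foldl altCell (b, r, k)
    = (b + (row.count "B" : Int), r + (row.count "R" : Int), k + (row.count "B" : Int)) := by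
  induction row generalizing b r k with
  | nil => simp
  | cons x xs ih =>
    rw [List.foldl_cons]
    by_cases hb : x = "B"
    · subst hb
      rw [show altCell (b, r, k) "B" = (b + 1, r, k + 1) from by simp [altCell]]
      rw [ih]
      simp [Prod.ext_iff]
      omega
    · have h1' : ("B" == x) = false := beq_eq_false_iff_ne.mpr (fun h => hb h.symm)
      by_cases hr : x = "R"
      · subst hr
        rw [show altCell (b, r, k) "R" = (b, r + 1, k) from by simp [altCell]]
        rw [ih]
        simp [h1', Prod.ext_iff]
        omega
      · have h2' : ("R" == x) = false := beq_eq_false_iff_ne.mpr (fun h => hr h.symm)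
        rw [show altCell (b, r, k) x = (b, r, k) from by simp [altCell, hb, hr]]
        rw [ih]
        simp [List.count_cons, h1', h2']
        exact ⟨hb, hr, hb⟩

-- count "B" = length iff every element is "B"
theorem rowAllB (row : List String) :
    ((row.count "B" : Int) == (row.length : Int)) = row.all (fun j => j == "B") := by
  rw [Bool.eq_iff_iff]
  simp only [beq_iff_eq, Int.natCast_inj, List.all_eq_true, beq_iff_eq]
  rw [List.count_eq_length]
  constructor <;> intro h x hx <;> exact (h x hx).symm

-- the outer fold accumulates flat counts and the any-all-B flag
theorem altOuterFold (arr : List (List String)) (b r : Int) (w : Bool) :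
    arr.foldl altScanRow (b, r, w)
    = (b + ((arr.flatMap (fun i => i)).count "B" : Int),
       r + ((arr.flatMap (fun i => i)).count "R" : Int),
       w || arr.any (fun row => row.all (fun j => j == "B"))) := by
  induction arr generalizing b r w with
  | nil => simp
  | cons row rs ih =>
    simp only [List.foldl_cons, altScanRow, altRowFold, List.flatMap_cons, List.count_append]
    rw [ih]
    simp [rowAllB, Bool.or_assoc]
    constructor <;> push_cast <;> ring

theorem blueLoop_eq (l : List (List String)) (b : Bool) :
    checkBlueLoop l b = (b || l.any (fun r => r.all (fun j => j == "B"))) := by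
  induction l generalizing b with
  | nil => simp [checkBlueLoop]
  | cons r rs ih =>
    cases b with
    | true => simp [checkBlueLoop]
    | false =>
      simp only [checkBlueLoop, Bool.not_false, if_true, ih, List.any_cons, Bool.false_or]
      cases h : r.all (fun j => j == "B") <;> simp

theorem redLoop_eq (arr : List (List String)) (N : Int) (l : List Int) (b : Bool) :
    checkRedLoop arr N l b
    = (b || l.any (fun i => (checkCol arr N i).all (fun j => j == "R"))) := by
  induction l generalizing b with
  | nil => simp [checkRedLoop]
  | cons i rest ih =>
    cases b with
    | true => simp [checkRedLoop]
    | false =>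
      simp only [checkRedLoop, Bool.not_false, if_true, List.any_cons, Bool.false_or]
      cases h : (checkCol arr N i).all (fun j => j == "R") <;> simp [ih]

-- folding filters = one filter by the conjunction over the folded list
theorem foldl_filter {α β : Type} (p : β → α → Bool) (js : List β) (init : List α) :
    js.foldl (fun c j => c.filter (p j)) init
    = init.filter (fun i => js.all (fun j => p j i)) := by
  induction js generalizing init with
  | nil => simp
  | cons j js ih =>
    simp only [List.foldl_cons, ih, List.filter_filter, List.all_cons]
    apply List.filter_congr
    intro x _
    exact Bool.and_comm _ _

theorem not_isEmpty_filter {α : Type} (p : α → Bool) (l : List α) :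
    (!(l.filter p).isEmpty) = l.any p := by
  induction l with
  | nil => simp
  | cons x xs ih =>
    by_cases h : p x = true <;> simp [h, ih]

theorem guard_iff (B R : Int) :
    (1 < |B - R|) ↔ ¬(B + 1 = R ∨ B - 1 = R ∨ B = R) := by
  rcases abs_cases (B - R) with ⟨h1, h2⟩ | ⟨h1, h2⟩ <;> rw [h1] <;> omega

-- ===== VERDICT (by name: the statement is the Claim_ definition above) =====
theorem check_spec : Claim_equal_check := by
  intro arr N _ _
  unfold Spec_check check check_alt
  rw [altOuterFold]
  simp only [zero_add, Bool.false_or]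
  set B : Int := ((arr.flatMap (fun i => i)).count "B" : Int) with hB
  set R : Int := ((arr.flatMap (fun i => i)).count "R" : Int) with hR
  have hBR : PySem.List.count (arr.flatMap (fun i => i)) "B" = (arr.flatMap (fun i => i)).count "B" := by
    simp [PySem.List.count]
  have hRR : PySem.List.count (arr.flatMap (fun i => i)) "R" = (arr.flatMap (fun i => i)).count "R" := by
    simp [PySem.List.count]
  by_cases hg : 1 < |B - R|
  · have hcond := (guard_iff B R).mp hg
    have : (!((B : Int) + 1 == R || B - 1 == R || B == R)) = true := by
      simp only [Bool.not_eq_true', Bool.or_eq_false_iff, beq_eq_false_iff_ne, ne_eq]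
      exact ⟨⟨fun h => hcond (Or.inl h), fun h => hcond (Or.inr (Or.inl h))⟩,
        fun h => hcond (Or.inr (Or.inr h))⟩
    simp only [hBR, hRR, ← hB, ← hR, this, hg, if_pos]
  · have hcond : B + 1 = R ∨ B - 1 = R ∨ B = R := by
      by_contra hc
      exact hg ((guard_iff B R).mpr hc)
    have : (!((B : Int) + 1 == R || B - 1 == R || B == R)) = false := by
      rcases hcond with h | h | h <;> simp [h]
    simp only [hBR, hRR, ← hB, ← hR, this, if_false, hg]
    rw [blueLoop_eq, redLoop_eq, foldl_filter, not_isEmpty_filter]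
    simp only [Bool.false_or, checkCol, List.all_map]
    rfl
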